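-- pv_equiv track=rewrite | github.com/stilyantanev/Programming101-v3 | week1-Python-Problems/3-The-Final-Round/prepare_meal.py | spam_times
-- ===== SOURCE A (Python) =====
-- def spam_times(number):
--     n = 0
--     times = 0
--
--     while 3 ** n <= number:
--         if number % (3 ** n) == 0:
--             times = n
--         n += 1
--
--     return times
-- ===== SOURCE B (Python) =====
-- def spam_times(number):
--     if number < 1:
--         return 0
--     times = 0
--     while number % 3 == 0:
--         number //= 3
--         times += 1
--     return times
-- ===== Notes on version B (the rewrite author's own statement) =====
-- stated objective: alternative
-- what changed: B divides factors of three out of a shrinking quotient and counts them (after an early return for inputs below one), instead of testing each successive power of three for divisibility up to the input.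
import Mathlib
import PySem

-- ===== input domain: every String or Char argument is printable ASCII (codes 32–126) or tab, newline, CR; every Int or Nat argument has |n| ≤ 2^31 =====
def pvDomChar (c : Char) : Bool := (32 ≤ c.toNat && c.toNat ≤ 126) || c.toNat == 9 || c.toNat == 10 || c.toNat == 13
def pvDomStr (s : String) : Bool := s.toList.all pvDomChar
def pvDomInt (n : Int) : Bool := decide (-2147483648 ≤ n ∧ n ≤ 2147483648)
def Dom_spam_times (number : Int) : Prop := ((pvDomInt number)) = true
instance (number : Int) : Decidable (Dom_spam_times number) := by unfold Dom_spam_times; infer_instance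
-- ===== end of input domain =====

-- B divides factors of three out of a shrinking quotient and counts them, instead of
-- testing each successive power of three for divisibility (objective: alternative algorithm).


-- ===== PORT A =====
-- while 3 ** n <= number: if number % (3 ** n) == 0: times = n; n += 1
def spamTimesLoopA (number : Int) (n : Nat) (times : Int) : Int :=
  if (3:Int) ^ n ≤ number then
    spamTimesLoopA number (n + 1) (if PySem.Int.mod number ((3:Int) ^ n) = 0 then (n : Int) else times)
  else times
termination_by (number + 1 - (3:Int) ^ n).toNat
decreasing_by
  have h1 : (1:Int) ≤ (3:Int) ^ n := one_le_pow₀ (by norm_num)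
  have h2 : (3:Int) ^ (n + 1) = 3 * (3:Int) ^ n := by ring
  rw [h2]
  omega

def spam_times (number : Int) : Int := spamTimesLoopA number 0 0

-- ===== PORT B =====
-- if number < 1: return 0; while number % 3 == 0: number //= 3; times += 1; return times
-- (the '1 ≤ m' conjunct in the guard only makes the recursion total; it always holds when
--  the loop is entered with number ≥ 1, since 3 ∣ m and m ≥ 1 give m // 3 ≥ 1)
def spamTimesLoopB (m : Int) (times : Int) : Int :=
  if h : 1 ≤ m ∧ PySem.Int.mod m 3 = 0 then
    spamTimesLoopB (PySem.Int.floordiv m 3) (times + 1)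
  else times
termination_by m.toNat
decreasing_by
  rcases h with ⟨h1, h2⟩
  rw [PySem.Int.mod_eq_zero_iff_dvd] at h2
  rw [PySem.Int.floordiv_eq_ediv_of_pos (by norm_num)]
  omega

def spam_times_alt (number : Int) : Int :=
  if number < 1 then 0 else spamTimesLoopB number 0

-- ===== PRECONDITION & SPEC =====
def Spec_spam_times (number : Int) (out : Int) : Prop := out = spam_times_alt number
instance (number : Int) (out : Int) : Decidable (Spec_spam_times number out) := by unfold Spec_spam_times; infer_instance

-- ===== CLAIM (what is proved, stated in full; the proofs are below) =====
def Claim_equal_spam_times : Prop := ∀ (number : Int), Dom_spam_times number → Spec_spam_times number (spam_times number)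

-- ===== LEMMAS AND PROOFS =====

-- the 3-adic valuation of number.toNat, the common value both loops compute for number ≥ 1
def pvK (number : Int) : Nat := padicValNat 3 number.toNat

lemma pvK_pow_dvd {number : Int} (h : 1 ≤ number) : (3:Int) ^ pvK number ∣ number := by
  have hn : number.toNat ≠ 0 := by omega
  have := pow_padicValNat_dvd (p := 3) (n := number.toNat)
  have : ((3:Int)) ^ pvK number ∣ (number.toNat : Int) := by
    exact_mod_cast Int.natCast_dvd_natCast.mpr this
  simpa [Int.toNat_of_nonneg (by omega : (0:Int) ≤ number)] using this

lemma pvK_succ_not_dvd {number : Int} (h : 1 ≤ number) :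
    ¬ (3:Int) ^ (pvK number + 1) ∣ number := by
  have hn : number.toNat ≠ 0 := by omega
  haveI : Fact (Nat.Prime 3) := ⟨by norm_num⟩
  have hnd := pow_succ_padicValNat_not_dvd (p := 3) hn
  intro hc
  apply hnd
  have h2 : ((3:Nat) ^ (pvK number + 1) : Int) ∣ (number.toNat : Int) := by
    push_cast
    simpa [Int.toNat_of_nonneg (by omega : (0:Int) ≤ number)] using hc
  exact_mod_cast h2

lemma pvK_not_dvd_of_gt {number : Int} (h : 1 ≤ number) {n : Nat} (hn : pvK number < n) :
    ¬ (3:Int) ^ n ∣ number := fun hc =>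
  pvK_succ_not_dvd h (dvd_trans (pow_dvd_pow 3 (by omega)) hc)

lemma pvK_pow_le {number : Int} (h : 1 ≤ number) {n : Nat} (hn : n ≤ pvK number) :
    (3:Int) ^ n ≤ number :=
  le_trans (pow_le_pow_right₀ (by norm_num) hn)
    (Int.le_of_dvd (by omega) (pvK_pow_dvd h))

-- A's loop: once n has passed pvK it returns the accumulator; before that it returns pvK
lemma loopA_eq {number : Int} (h : 1 ≤ number) :
    ∀ n times, spamTimesLoopA number n times =
      (if n ≤ pvK number then (pvK number : Int) else times) := by
  intro n times
  fun_induction spamTimesLoopA number n times with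
  | case1 n times hle ih =>
    simp only [dite_eq_ite] at ih
    rw [ih]
    by_cases hn : n ≤ pvK number
    · rcases Nat.lt_or_ge n (pvK number) with hlt | hge
      · -- n < pvK : divisibility holds, but recursive result is still pvK
        simp only [hn, if_pos]
        have : n + 1 ≤ pvK number := hlt
        simp [this]
      · -- n = pvK : accumulator becomes pvK
        have hEq : n = pvK number := le_antisymm hn hge
        have : ¬ n + 1 ≤ pvK number := by omega
        simp [hEq]
        intro hc
        exact absurd (pvK_pow_dvd h) hc
    · -- n > pvK : divisibility fails, accumulator unchanged
      have : ¬ n + 1 ≤ pvK number := by omega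
      simp [hn, this]
      intro hc
      exact absurd hc (pvK_not_dvd_of_gt h (by omega))
  | case2 n times hle =>
    have : ¬ n ≤ pvK number := fun hn => hle (pvK_pow_le h hn)
    simp [this]

-- B's loop adds the 3-adic valuation of m to the accumulator
lemma loopB_eq : ∀ m times : Int, 1 ≤ m →
    spamTimesLoopB m times = times + (pvK m : Int) := by
  intro m times h
  fun_induction spamTimesLoopB m times with
  | case1 m times hg ih =>
    rcases hg with ⟨h1, h2⟩
    rw [PySem.Int.mod_eq_zero_iff_dvd] at h2
    have hq : PySem.Int.floordiv m 3 = m / 3 :=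
      PySem.Int.floordiv_eq_ediv_of_pos (by norm_num)
    have h3 : (1:Int) ≤ m / 3 := by
      rcases h2 with ⟨c, hc⟩
      have : m / 3 = c := by omega
      omega
    rw [ih (by rw [hq]; exact h3)]
    have hv : pvK m = pvK (PySem.Int.floordiv m 3) + 1 := by
      unfold pvK
      rw [hq]
      have hdvdNat : 3 ∣ m.toNat := by
        rcases h2 with ⟨c, hc⟩
        refine ⟨c.toNat, ?_⟩
        omega
      have htn : (m / 3).toNat = m.toNat / 3 := by
        rcases h2 with ⟨c, hc⟩
        have : m / 3 = c := by omega
        omega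
      haveI : Fact (Nat.Prime 3) := ⟨by norm_num⟩
      rw [htn, padicValNat.div hdvdNat]
      have hpos : 1 ≤ padicValNat 3 m.toNat :=
        one_le_padicValNat_of_dvd (by omega) hdvdNat
      omega
    rw [hv]
    push_cast
    ring
  | case2 m times hg =>
    simp only [not_and_or] at hg
    rcases hg with h1 | h2
    · omega
    · have : ¬ (3:Int) ∣ m := fun hc =>
        h2 (by rw [PySem.Int.mod_eq_zero_iff_dvd]; exact hc)
      have hv : pvK m = 0 := by
        unfold pvK
        apply padicValNat.eq_zero_of_not_dvd
        intro hc
        apply this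
        rcases hc with ⟨c, hc⟩
        exact ⟨(c : Int), by omega⟩
      simp [hv]

-- ===== VERDICT (by name: the statement is the Claim_ definition above) =====
theorem spam_times_spec : Claim_equal_spam_times := by
  intro number _
  unfold Spec_spam_times spam_times spam_times_alt
  by_cases h : number < 1
  · rw [spamTimesLoopA]
    have : ¬ (3:Int) ^ 0 ≤ number := by simpa using by omega
    simp [h]
  · have h1 : 1 ≤ number := by omega
    rw [loopA_eq h1 0 0, loopB_eq number 0 h1]
    simp [h]
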